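-- pv_equiv track=rewrite | github.com/construct-admin/AI-MicroApps-main | canvas_import_v2.py | convert_bullets
-- ===== SOURCE A (Python) =====
-- def convert_bullets(text):
--     lines = text.split("\n")
--     out = []
--     in_list = False
--     for line in lines:
--         if line.strip().startswith("-"):
--             if not in_list:
--                 out.append("<ul>")
--                 in_list = True
--             out.append(f"<li>{line.strip()[1:].strip()}</li>")
--         else:
--             if in_list:
--                 out.append("</ul>")
--                 in_list = False
--             out.append(line)
--     if in_list:
--         out.append("</ul>")
--     return '\n'.join(out)
-- ===== SOURCE B (Python) =====
-- def convert_bullets(text):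
--     lines = text.split("\n")
--     out = []
--     i = 0
--     n = len(lines)
--     while i < n:
--         if lines[i].strip().startswith("-"):
--             j = i
--             while j < n and lines[j].strip().startswith("-"):
--                 j += 1
--             out.append("<ul>")
--             out.extend(f"<li>{l.strip()[1:].strip()}</li>" for l in lines[i:j])
--             out.append("</ul>")
--             i = j
--         else:
--             out.append(lines[i])
--             i += 1
--     return "\n".join(out)
-- ===== Notes on version B (the rewrite author's own statement) =====
-- stated objective: alternative
-- what changed: Replaces A's single pass with an in_list state flag by a run-based scan: an outer loop that, on a dash line, advances an inner scan to the end of the maximal dash-run and emits <ul>, the <li> items and </ul> in one place, so the flag and the trailing close-guard disappear.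
import Mathlib
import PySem

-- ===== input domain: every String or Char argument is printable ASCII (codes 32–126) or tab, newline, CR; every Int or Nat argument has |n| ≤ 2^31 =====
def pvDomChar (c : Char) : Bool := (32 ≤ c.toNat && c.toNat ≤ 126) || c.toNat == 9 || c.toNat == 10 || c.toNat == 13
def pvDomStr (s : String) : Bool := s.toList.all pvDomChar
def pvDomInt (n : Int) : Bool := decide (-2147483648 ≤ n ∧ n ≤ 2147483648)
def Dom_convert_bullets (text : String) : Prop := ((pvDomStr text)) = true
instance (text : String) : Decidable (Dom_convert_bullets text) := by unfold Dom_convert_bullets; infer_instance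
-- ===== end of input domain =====

-- B replaces A's in_list flag with a run-based scan (find each maximal dash-run, wrap it in <ul>…</ul> at once); objective: alternative decomposition, same cost.


-- shared helpers: line.strip().startswith("-") and the f"<li>…</li>" piece (identical text in A and B)
def isDash (l : String) : Bool := PySem.Str.startswith (PySem.Str.strip l) "-"
def mkLi (l : String) : String :=
  "<li>" ++ PySem.Str.strip (PySem.Str.slice (PySem.Str.strip l) (some 1) none) ++ "</li>"

-- ===== PORT A =====
-- A: one pass with an in_list flag, appending to out (foldl over (out, in_list))
def convert_bullets (text : String) : String :=
  let lines := ((PySem.Str.split? text "\n").getD [])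
  let st := lines.foldl (fun (st : List String × Bool) line =>
      if isDash line then
        ((if st.2 then st.1 else st.1 ++ ["<ul>"]) ++ [mkLi line], true)
      else
        ((if st.2 then st.1 ++ ["</ul>"] else st.1) ++ [line], false)) ([], false)
  PySem.Str.join "\n" (if st.2 then st.1 ++ ["</ul>"] else st.1)

-- ===== PORT B =====
-- B: recursion over the lines; on a dash line take the whole maximal dash-run (python's inner j-scan = takeWhile/dropWhile) and emit <ul> … </ul> around it
def bLoop : List String → List String
  | [] => []
  | l :: ls =>
    if isDash l then
      "<ul>" :: (((l :: ls).takeWhile isDash).map mkLi ++ "</ul>" :: bLoop ((l :: ls).dropWhile isDash))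
    else l :: bLoop ls
termination_by ls => ls.length
decreasing_by
  · simp only [List.dropWhile_cons, *]
    have := List.length_dropWhile_le isDash ls
    simpa using Nat.lt_succ_of_le this
  · simp

def convert_bullets_alt (text : String) : String :=
  PySem.Str.join "\n" (bLoop (((PySem.Str.split? text "\n").getD [])))

-- ===== PRECONDITION & SPEC =====
def Spec_convert_bullets (text : String) (out : String) : Prop := out = convert_bullets_alt text
instance (text : String) (out : String) : Decidable (Spec_convert_bullets text out) := by unfold Spec_convert_bullets; infer_instance

-- ===== CLAIM (what is proved, stated in full; the proofs are below) =====
def Claim_equal_convert_bullets : Prop := ∀ (text : String), Dom_convert_bullets text → Spec_convert_bullets text (convert_bullets text)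

-- ===== LEMMAS AND PROOFS =====

-- A's loop, written front-to-back as structural recursion on the remaining lines and the flag
def aRec : List String → Bool → List String
  | [], inList => if inList then ["</ul>"] else []
  | l :: ls, inList =>
    if isDash l then (if inList then [] else ["<ul>"]) ++ mkLi l :: aRec ls true
    else (if inList then ["</ul>"] else []) ++ l :: aRec ls false

theorem foldl_eq_aRec (lines : List String) : ∀ (out : List String) (inList : Bool),
    (let st := lines.foldl (fun (st : List String × Bool) line =>
      if isDash line then
        ((if st.2 then st.1 else st.1 ++ ["<ul>"]) ++ [mkLi line], true)
      else
        ((if st.2 then st.1 ++ ["</ul>"] else st.1) ++ [line], false)) (out, inList)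
     if st.2 then st.1 ++ ["</ul>"] else st.1) = out ++ aRec lines inList := by
  induction lines with
  | nil => intro out inList; cases inList <;> simp [aRec]
  | cons l ls ih =>
    intro out inList
    by_cases h : isDash l = true <;> cases inList <;>
      simp [List.foldl_cons, h, ih, aRec]

theorem aRec_eq_bLoop (lines : List String) :
    aRec lines false = bLoop lines ∧
    aRec lines true = (lines.takeWhile isDash).map mkLi ++ "</ul>" :: bLoop (lines.dropWhile isDash) := by
  induction lines with
  | nil => simp [aRec, bLoop]
  | cons l ls ih =>
    by_cases h : isDash l = true
    · constructor
      · rw [bLoop.eq_def]; simp [aRec, h, ih.2]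
      · simp [aRec, h, ih.2]
    · constructor
      · rw [bLoop.eq_def]; simp [aRec, h, ih.1]
      · rw [bLoop.eq_def]; simp [aRec, h, ih.1]

-- ===== VERDICT (by name: the statement is the Claim_ definition above) =====
theorem convert_bullets_spec : Claim_equal_convert_bullets := by
  intro text _
  unfold Spec_convert_bullets convert_bullets convert_bullets_alt
  dsimp only
  have h := foldl_eq_aRec (((PySem.Str.split? text "\n").getD [])) [] false
  dsimp only at h
  rw [h, List.nil_append, (aRec_eq_bLoop _).1]
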